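-- pv_equiv track=rewrite | github.com/Grappe501/KellyGrappe | tools/dashboard_composer.py | detect_missing_capabilities
-- ===== SOURCE A (Python) =====
-- def detect_missing_capabilities(dashboards, capabilities):
--
--     existing_cards = set(capabilities["capabilities"].keys())
--
--     missing = []
--
--     for dashboard in dashboards.values():
--         for card in dashboard["cards"]:
--             if card not in existing_cards:
--                 missing.append(card)
--
--     return sorted(set(missing))
-- ===== SOURCE B (Python) =====
-- def detect_missing_capabilities(dashboards, capabilities):
--     cards = sorted({card for dashboard in dashboards.values() for card in dashboard["cards"]})
--     have = sorted(capabilities["capabilities"].keys())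
--     out = []
--     i = j = 0
--     while i < len(cards):
--         if j < len(have) and have[j] < cards[i]:
--             j += 1
--         elif j < len(have) and have[j] == cards[i]:
--             i += 1
--             j += 1
--         else:
--             out.append(cards[i])
--             i += 1
--     return out
-- ===== Notes on version B (the rewrite author's own statement) =====
-- stated objective: alternative
-- what changed: Instead of testing each card against a hash set and re-sorting the leftovers, B sorts the distinct cards and the capability keys once and computes the missing cards by a two-pointer merge scan over the two sorted lists, so no membership test and no final sort on the result is needed.
import Mathlib
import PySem

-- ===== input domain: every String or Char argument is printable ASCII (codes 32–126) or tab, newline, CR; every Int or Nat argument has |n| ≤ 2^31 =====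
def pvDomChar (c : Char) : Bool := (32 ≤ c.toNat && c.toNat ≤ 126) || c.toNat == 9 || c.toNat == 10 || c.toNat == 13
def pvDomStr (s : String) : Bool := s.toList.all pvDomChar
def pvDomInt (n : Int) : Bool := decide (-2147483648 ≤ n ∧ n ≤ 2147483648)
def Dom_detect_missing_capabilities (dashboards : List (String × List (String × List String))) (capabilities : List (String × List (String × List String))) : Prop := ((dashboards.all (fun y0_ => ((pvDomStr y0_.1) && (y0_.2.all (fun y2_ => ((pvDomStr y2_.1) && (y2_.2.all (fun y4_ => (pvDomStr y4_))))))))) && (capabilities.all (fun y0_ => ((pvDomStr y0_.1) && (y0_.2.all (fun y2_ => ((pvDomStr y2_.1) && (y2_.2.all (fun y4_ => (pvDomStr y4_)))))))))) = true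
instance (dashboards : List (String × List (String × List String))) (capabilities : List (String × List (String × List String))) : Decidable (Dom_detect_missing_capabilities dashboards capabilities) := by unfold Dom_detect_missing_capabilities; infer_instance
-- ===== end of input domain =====

-- B sorts the distinct cards and the capability keys once and finds the missing cards by a
-- two-pointer merge scan over the two sorted lists, instead of per-card set membership plus
-- a final sort of the leftovers (objective: alternative algorithm, same asymptotic cost).

-- ===== PORT A =====
def detect_missing_capabilities (dashboards : List (String × List (String × List String))) (capabilities : List (String × List (String × List String))) : List String :=
  -- existing_cards = set(capabilities["capabilities"].keys())   (lookup guarded by Pre_)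
  let existing_cards : PySem.Set String :=
    PySem.Set.ofList (PySem.Dict.keys (PySem.Dict.ofList ((PySem.Dict.get? (PySem.Dict.ofList capabilities) "capabilities").getD [])))
  -- for dashboard in dashboards.values(): for card in dashboard["cards"]: if card not in existing_cards: missing.append(card)
  let missing : List String :=
    (PySem.Dict.values (PySem.Dict.ofList dashboards)).foldl (fun acc dashboard =>
      ((PySem.Dict.get? (PySem.Dict.ofList dashboard) "cards").getD []).foldl (fun acc card =>
        if PySem.Set.contains existing_cards card then acc else acc ++ [card]) acc) []
  -- return sorted(set(missing))
  PySem.List.sorted (PySem.Set.ofList missing) (fun x => x) false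

-- ===== PORT B =====
-- the while loop of Source B: two cursors over the sorted `cards` and `have` lists, as the
-- obvious structural recursion on the two suffixes still to scan
def pvMergeScan : List String → List String → List String
  | [], _ => []
  | x :: xs, [] => x :: pvMergeScan xs []      -- else-branch: emit cards[i], i += 1
  | x :: xs, y :: ys =>
    if y < x then pvMergeScan (x :: xs) ys     -- have[j] < cards[i]: j += 1
    else if y = x then pvMergeScan xs ys       -- have[j] == cards[i]: i += 1; j += 1
    else x :: pvMergeScan xs (y :: ys)         -- emit cards[i], i += 1
termination_by xs ys => xs.length + ys.length

def detect_missing_capabilities_alt (dashboards : List (String × List (String × List String))) (capabilities : List (String × List (String × List String))) : List String :=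
  -- cards = sorted({card for dashboard in dashboards.values() for card in dashboard["cards"]})
  let cards : List String :=
    PySem.List.sorted
      (PySem.Set.ofList ((PySem.Dict.values (PySem.Dict.ofList dashboards)).flatMap (fun dashboard =>
        (PySem.Dict.get? (PySem.Dict.ofList dashboard) "cards").getD [])))
      (fun x => x) false
  -- have = sorted(capabilities["capabilities"].keys())
  let haveKeys : List String :=
    PySem.List.sorted
      (PySem.Dict.keys (PySem.Dict.ofList ((PySem.Dict.get? (PySem.Dict.ofList capabilities) "capabilities").getD [])))
      (fun x => x) false
  pvMergeScan cards haveKeys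

-- ===== PRECONDITION & SPEC =====
-- Pre_ excludes exactly the inputs where Python raises KeyError: a missing "capabilities"
-- key in `capabilities`, or a dashboard value without a "cards" key (B raises there too).
def Pre_detect_missing_capabilities (dashboards : List (String × List (String × List String))) (capabilities : List (String × List (String × List String))) : Prop :=
  (PySem.Dict.get? (PySem.Dict.ofList capabilities) "capabilities").isSome = true ∧
  ∀ d ∈ PySem.Dict.values (PySem.Dict.ofList dashboards), (PySem.Dict.get? (PySem.Dict.ofList d) "cards").isSome = true
instance (dashboards : List (String × List (String × List String))) (capabilities : List (String × List (String × List String))) : Decidable (Pre_detect_missing_capabilities dashboards capabilities) := by unfold Pre_detect_missing_capabilities; infer_instance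
def pvWitness_detect_missing_capabilities : (List (String × List (String × List String))) × (List (String × List (String × List String))) :=
  ([("overview", [("cards", ["cpu", "disk"])])], [("capabilities", [("cpu", ["a"])])])

def Spec_detect_missing_capabilities (dashboards : List (String × List (String × List String))) (capabilities : List (String × List (String × List String))) (out : List String) : Prop := out = detect_missing_capabilities_alt dashboards capabilities
instance (dashboards : List (String × List (String × List String))) (capabilities : List (String × List (String × List String))) (out : List String) : Decidable (Spec_detect_missing_capabilities dashboards capabilities out) := by unfold Spec_detect_missing_capabilities; infer_instance

-- ===== CLAIM (what is proved, stated in full; the proofs are below) =====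
def Claim_equal_detect_missing_capabilities : Prop := ∀ (dashboards : List (String × List (String × List String))) (capabilities : List (String × List (String × List String))), Dom_detect_missing_capabilities dashboards capabilities → Pre_detect_missing_capabilities dashboards capabilities → Spec_detect_missing_capabilities dashboards capabilities (detect_missing_capabilities dashboards capabilities)

-- ===== LEMMAS AND PROOFS =====

-- A's loops build exactly the not-in-existing cards, in flatMap order
theorem missing_eq_filter (vs : List (List (String × List String))) (ex : PySem.Set String) :
    vs.foldl (fun acc dashboard =>
      ((PySem.Dict.get? (PySem.Dict.ofList dashboard) "cards").getD []).foldl (fun acc card =>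
        if PySem.Set.contains ex card then acc else acc ++ [card]) acc) []
    = (vs.flatMap (fun d => (PySem.Dict.get? (PySem.Dict.ofList d) "cards").getD [])).filter
        (fun c => !PySem.Set.contains ex c) := by
  rw [List.filter_flatMap, ← List.nil_append (List.flatMap _ vs),
    ← PySem.List.foldl_append_eq_flatMap]
  apply PySem.List.foldl_congr_mem
  intro acc d _
  rw [show (fun acc card => if PySem.Set.contains ex card then acc else acc ++ [card])
        = (fun (acc : List String) card => if (!PySem.Set.contains ex card) then acc ++ [card] else acc) from ?_]
  · exact PySem.List.foldl_append_if_eq_filter _ _ _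
  · funext acc' c
    cases PySem.Set.contains ex c
    · simp
    · simp

-- the merge scan over a strictly increasing left list and a sorted right list keeps
-- exactly the left elements absent from the right list, in order
theorem pvMergeScan_eq_filter (xs ys : List String)
    (hx : xs.Pairwise (· < ·)) (hy : ys.Pairwise (· ≤ ·)) :
    pvMergeScan xs ys = xs.filter (fun a => !ys.contains a) := by
  fun_induction pvMergeScan xs ys with
  | case1 ys => simp
  | case2 x xs ih => simp [ih (List.Pairwise.of_cons hx) hy]
  | case3 x xs y ys hlt ih =>
    rw [ih hx (List.Pairwise.of_cons hy)]
    apply List.filter_congr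
    intro a ha
    have hxa : x ≤ a := by
      rcases List.mem_cons.mp ha with rfl | h
      · exact le_refl a
      · exact le_of_lt (List.rel_of_pairwise_cons hx h)
    have hne : y ≠ a := fun h => absurd (h ▸ lt_of_lt_of_le hlt hxa) (lt_irrefl _)
    simp only [List.contains_cons]
    congr 1
    simp [beq_iff_eq]
    intro h; exact (hne h.symm).elim
  | case4 xs x ys hnl ih =>
    rw [List.filter_cons_of_neg (by simp), ih (List.Pairwise.of_cons hx) (List.Pairwise.of_cons hy)]
    apply List.filter_congr
    intro a ha
    have hya : x < a := List.rel_of_pairwise_cons hx ha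
    simp only [List.contains_cons]
    congr 1
    simp [beq_iff_eq]
    intro h; exact absurd (h ▸ hya) (lt_irrefl a)
  | case5 x xs y ys hlt hne2 ih =>
    have hxy : x < y := lt_of_le_of_ne (le_of_not_gt hlt) (fun h => hne2 h.symm)
    have hnotin : ¬ x ∈ y :: ys := by
      intro h
      rcases List.mem_cons.mp h with rfl | h
      · exact absurd hxy (lt_irrefl _)
      · exact absurd (lt_of_lt_of_le hxy (List.rel_of_pairwise_cons hy h)) (lt_irrefl _)
    rw [List.filter_cons_of_pos (by simpa using hnotin), ih (List.Pairwise.of_cons hx) hy]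

-- sorting a deduped filtered list = filtering the sorted deduped list
theorem sorted_ofList_filter (all : List String) (p : String → Bool) :
    PySem.List.sorted (PySem.Set.ofList (all.filter p)) (fun x => x) false
      = (PySem.List.sorted (PySem.Set.ofList all) (fun x => x) false).filter p := by
  apply PySem.List.sorted_eq_of_perm_of_pairwise_lt
  · apply (List.perm_ext_iff_of_nodup ?_ (PySem.Set.nodup_ofList _)).mpr
    · intro c
      simp [List.mem_filter, PySem.Set.mem_ofList, PySem.List.mem_sorted, and_comm]
    · exact List.Nodup.filter _
        ((PySem.List.sorted_perm _ _ _).nodup_iff.mpr (PySem.Set.nodup_ofList _))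
  · exact List.Pairwise.filter _ (PySem.List.sorted_ofList_pairwise_lt _)

-- ===== VERDICT (by name: the statement is the Claim_ definition above) =====
theorem detect_missing_capabilities_spec : Claim_equal_detect_missing_capabilities := by
  intro dashboards capabilities _ _
  unfold Spec_detect_missing_capabilities detect_missing_capabilities detect_missing_capabilities_alt
  simp only [missing_eq_filter]
  rw [pvMergeScan_eq_filter _ _ (PySem.List.sorted_ofList_pairwise_lt _)
    (PySem.List.sorted_pairwise _ _), sorted_ofList_filter]
  apply List.filter_congr
  intro c _
  congr 1
  rw [Bool.eq_iff_iff]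
  simp [PySem.Set.mem_ofList, PySem.List.mem_sorted]
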